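-- pv_equiv track=rewrite | github.com/jasha64/jasha64 | Spring 2019/Python/5.31/模拟考 魔术数.py | nth_magic_number
-- ===== SOURCE A (Python) =====
-- def is_magic_number(n):
--     #**********Program**********
--     n = abs(n)
--     numstr = str(n)
--     cnt = [0] * 10
--     mx = 0
--     for each in numstr:
--         cnt[int(each)] += 1
--         mx = max(mx, int(each))
--     for i in range(mx+1):
--         if cnt[i] != i:
--             return False
--     return True
--
-- def nth_magic_number(n):
--     #**********Program**********
--     if n <= 0:
--         raise ValueError('您输入的不是正整数！')
--     r = 0
--     while n > 0:
--         r += 1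
--         if is_magic_number(r):
--             n -= 1
--     return r
-- ===== SOURCE B (Python) =====
-- def _fact(x):
--     r = 1
--     for i in range(2, x + 1):
--         r *= i
--     return r
--
--
-- def _multinomial(cnt):
--     f = _fact(sum(cnt))
--     for c in cnt:
--         f //= _fact(c)
--     return f
--
--
-- def nth_magic_number(n):
--     # A magic number's digit multiset is exactly {1, 2,2, 3,3,3, ..., m..m}
--     # for its maximal digit m, so instead of scanning every integer we pick
--     # the block m by multinomial counting and unrank the n-th permutation.
--     if n <= 0:
--         raise ValueError('您输入的不是正整数！')
--     k = n - 1
--     cnt = []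
--     for m in range(1, 10):
--         cnt = list(range(1, m + 1))
--         total = _multinomial(cnt)
--         if k < total:
--             break
--         k -= total
--     else:
--         raise ValueError('超出魔术数范围！')
--     r = 0
--     for _ in range(sum(cnt)):
--         for d in range(1, len(cnt) + 1):
--             if cnt[d - 1] == 0:
--                 continue
--             cnt[d - 1] -= 1
--             c = _multinomial(cnt)
--             if k < c:
--                 r = r * 10 + d
--                 break
--             k -= c
--             cnt[d - 1] += 1
--     return r
-- ===== Notes on version B (the rewrite author's own statement) =====
-- stated objective: faster
-- what changed: Instead of testing every integer 1,2,3,... for the magic digit-count property, B uses that a magic number with maximal digit m is exactly a permutation of the digit multiset {1,2,2,3,3,3,...,m^m}: it selects the block m by multinomial counting and unranks the n-th permutation lexicographically, so no candidate scan happens at all.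
import Mathlib
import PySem

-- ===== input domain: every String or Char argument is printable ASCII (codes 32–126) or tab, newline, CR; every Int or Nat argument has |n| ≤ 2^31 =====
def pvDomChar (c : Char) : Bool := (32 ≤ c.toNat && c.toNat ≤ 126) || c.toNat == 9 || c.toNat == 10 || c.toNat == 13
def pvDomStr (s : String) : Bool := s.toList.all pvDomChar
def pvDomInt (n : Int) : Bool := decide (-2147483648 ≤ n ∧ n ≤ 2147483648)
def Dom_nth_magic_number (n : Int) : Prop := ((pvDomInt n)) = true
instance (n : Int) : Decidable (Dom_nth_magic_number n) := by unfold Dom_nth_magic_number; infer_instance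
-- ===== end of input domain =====

-- B replaces A's candidate-by-candidate scan by multinomial block counting plus lexicographic
-- unranking of the n-th digit permutation (measurably faster; A raises on n <= 0, excluded by Pre_).
set_option maxRecDepth 10000


-- ===== PORT A =====
-- is_magic_number's first loop body (cnt[int(each)] += 1; mx = max(mx, int(each))).
-- int(each) on a digit character never raises, so .getD 0 is exact; the list index
-- int(each) ∈ 0..9 is always in range for the 10-element cnt, so List.set/getD are exact.
def magicStep (st : List Int × Int) (each : Char) : List Int × Int :=
  let d := (PySem.Int.ofStr? (String.singleton each)).getD 0
  (st.1.set d.toNat (st.1.getD d.toNat 0 + 1), max st.2 d)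

-- port of is_magic_number; mx ≥ 0 always holds (it starts at 0), so range(mx+1) is List.range (mx.toNat+1)
def isMagicA (n : Int) : Bool :=
  let numstr := PySem.Int.toStr |n|
  let res := numstr.toList.foldl magicStep (List.replicate 10 (0 : Int), 0)
  (List.range (res.2.toNat + 1)).all (fun i => res.1.getD i 0 == (i : Int))

-- the while-loop of nth_magic_number, with fuel making it total: 10^45 steps suffice for every
-- n a 64-bit machine can hold (every magic number has at most 45 digits), proved below — not assumed
def goA : Nat → Int → Int → Int
  | 0, _, r => r
  | f + 1, n, r =>
      if n > 0 then
        let r' := r + 1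
        goA f (if isMagicA r' then n - 1 else n) r'
      else r

def nth_magic_number (n : Int) : Int :=
  if n ≤ 0 then 0      -- Python raises ValueError here; excluded by Pre_
  else goA 1000000000000000000000000000000000000000000000 n 0

-- ===== PORT B =====
def factB (x : Int) : Int :=
  (PySem.List.pyRange 2 (x + 1) 1).foldl (fun r i => r * i) 1

def multinomialB (cnt : List Int) : Int :=
  let f := factB (cnt.foldl (· + ·) 0)
  cnt.foldl (fun f c => PySem.Int.floordiv f (factB c)) f

-- the 'for m in range(1, 10)' block-selection loop (break / else)
def pickBlockB : List Int → Int → List Int × Int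
  | [], k => ([], k)      -- for-else: Python raises there (n beyond every magic number, |n| > 2^31)
  | m :: ms, k =>
      let cnt := PySem.List.pyRange 1 (m + 1) 1
      let total := multinomialB cnt
      if k < total then (cnt, k) else pickBlockB ms (k - total)

-- the inner 'for d in range(1, len(cnt)+1)' loop with continue / break
def innerB : List Int → List Int → Int → Int → List Int × Int × Int
  | [], cnt, k, r => (cnt, k, r)
  | d :: ds, cnt, k, r =>
      if cnt.getD (d - 1).toNat 0 == 0 then innerB ds cnt k r
      else
        let cnt' := cnt.set (d - 1).toNat (cnt.getD (d - 1).toNat 0 - 1)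
        let c := multinomialB cnt'
        if k < c then (cnt', k, r * 10 + d)
        else innerB ds (cnt'.set (d - 1).toNat (cnt'.getD (d - 1).toNat 0 + 1)) (k - c) r

-- the outer 'for _ in range(sum(cnt))' loop
def outerB : Nat → List Int → Int → Int → Int
  | 0, _, _, r => r
  | t + 1, cnt, k, r =>
      let s := innerB (PySem.List.pyRange 1 ((cnt.length : Int) + 1) 1) cnt k r
      outerB t s.1 s.2.1 s.2.2

def nth_magic_number_alt (n : Int) : Int :=
  if n ≤ 0 then 0      -- Python raises ValueError here; excluded by Pre_
  else
    let bk := pickBlockB (PySem.List.pyRange 1 10 1) (n - 1)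
    outerB (bk.1.foldl (· + ·) 0).toNat bk.1 bk.2 0

-- ===== PRECONDITION & SPEC =====
-- A raises ValueError exactly when n ≤ 0; Pre_ admits every n on which A returns.
def Pre_nth_magic_number (n : Int) : Prop := 1 ≤ n
instance (n : Int) : Decidable (Pre_nth_magic_number n) := by unfold Pre_nth_magic_number; infer_instance

def pvWitness_nth_magic_number : Int := 5

def Spec_nth_magic_number (n : Int) (out : Int) : Prop := out = nth_magic_number_alt n
instance (n : Int) (out : Int) : Decidable (Spec_nth_magic_number n out) := by unfold Spec_nth_magic_number; infer_instance

-- ===== CLAIM (what is proved, stated in full; the proofs are below) =====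
def Claim_equal_nth_magic_number : Prop := ∀ (n : Int), Dom_nth_magic_number n → Pre_nth_magic_number n → Spec_nth_magic_number n (nth_magic_number n)

-- ===== LEMMAS AND PROOFS =====

-- ---------- Part 0: characterisation of isMagicA by digit counts (as in Python) ----------
theorem toDigitsCore_eq : ∀ (f x : Nat) (ds : List Char), 0 < x → x < 10 ^ f →
    Nat.toDigitsCore 10 f x ds = ((Nat.digits 10 x).map Nat.digitChar).reverse ++ ds := by
  intro f
  induction f with
  | zero => intro x ds h1 h2; omega
  | succ f ih =>
    intro x ds h1 h2
    rw [Nat.toDigitsCore]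
    by_cases h : x / 10 = 0
    · have hx : x < 10 := by omega
      simp only [h, if_true]
      rw [Nat.digits_def' (by norm_num : 1 < 10) h1, Nat.div_eq_of_lt hx, Nat.digits_zero]
      simp [Nat.mod_eq_of_lt hx]
    · simp only [h, if_false]
      rw [ih (x/10) _ (by omega) (by
        have : x < 10 ^ f * 10 := by rw [← pow_succ]; exact h2
        omega)]
      rw [Nat.digits_def' (by norm_num : 1 < 10) h1]
      simp

theorem digit_parse (d : Nat) (h : d < 10) :
    (PySem.Int.ofStr? (String.singleton (Nat.digitChar d))).getD 0 = (d : Int) := by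
  interval_cases d <;> decide

theorem fold_char : ∀ (D : List Nat), (∀ d ∈ D, d < 10) → ∀ (cnt : List Int), cnt.length = 10 → ∀ mx : Int,
    ((D.map Nat.digitChar).foldl magicStep (cnt, mx)).1.length = 10 ∧
    (∀ i : Nat, i < 10 →
      ((D.map Nat.digitChar).foldl magicStep (cnt, mx)).1.getD i 0 = cnt.getD i 0 + D.count i) ∧
    ((D.map Nat.digitChar).foldl magicStep (cnt, mx)).2 = D.foldl (fun (m : Int) (d : Nat) => max m (d : Int)) mx := by
  intro D
  induction D with
  | nil => intro _ cnt hlen mx; simp [hlen]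
  | cons d D ih =>
    intro hd cnt hlen mx
    have hd10 : d < 10 := hd d (by simp)
    simp only [List.map_cons, List.foldl_cons, List.count_cons]
    have hstep : magicStep (cnt, mx) (Nat.digitChar d) =
        (cnt.set d (cnt.getD d 0 + 1), max mx (d : Int)) := by
      simp [magicStep, digit_parse d hd10]
    rw [hstep]
    obtain ⟨hl, hc, hm⟩ := ih (fun x hx => hd x (by simp [hx])) (cnt.set d (cnt.getD d 0 + 1))
      (by simp [hlen]) (max mx (d : Int))
    refine ⟨hl, ?_, by rw [hm]⟩
    intro i hi
    rw [hc i hi]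
    by_cases he : d = i
    · subst he
      rw [List.getD_eq_getElem?_getD, List.getElem?_set_self (by omega)]
      simp [List.getD_eq_getElem?_getD]
      ring
    · rw [List.getD_eq_getElem?_getD, List.getElem?_set_ne (by omega)]
      simp [List.getD_eq_getElem?_getD, he]

theorem castfold : ∀ (D : List Nat) (m : Nat),
    D.foldl (fun (a : Int) (d : Nat) => max a (d : Int)) (m : Int) = ((D.foldl max m : Nat) : Int) := by
  intro D
  induction D with
  | nil => simp
  | cons d D ih => intro m; simp only [List.foldl_cons, ← Nat.cast_max, ih]

theorem foldl_max_init : ∀ (D : List Nat) (m : Nat), m ≤ D.foldl max m := by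
  intro D
  induction D with
  | nil => simp
  | cons d D ih => intro m; exact le_trans (le_max_left m d) (ih _)

theorem foldl_max_mem : ∀ (D : List Nat) (m d : Nat), d ∈ D → d ≤ D.foldl max m := by
  intro D
  induction D with
  | nil => simp
  | cons e D ih =>
    intro m d hd
    rcases List.mem_cons.mp hd with h | h
    · subst h; exact le_trans (le_max_right m d) (foldl_max_init _ _)
    · exact ih _ _ h

theorem foldl_max_le : ∀ (D : List Nat) (m b : Nat), (∀ d ∈ D, d ≤ b) → m ≤ b → D.foldl max m ≤ b := by
  intro D
  induction D with
  | nil => intro m b _ h; simpa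
  | cons d D ih =>
    intro m b hD hm
    exact ih _ _ (fun x hx => hD x (by simp [hx])) (by have := hD d (by simp); omega)

theorem revfold : ∀ (D : List Nat) (m : Nat), D.reverse.foldl max m = D.foldl max m := by
  have swap : ∀ (D : List Nat) (m d : Nat), D.foldl max (max m d) = max (D.foldl max m) d := by
    intro D
    induction D with
    | nil => simp
    | cons e D ih =>
      intro m d
      simp only [List.foldl_cons]
      rw [show max (max m d) e = max (max m e) d by omega, ih]
  intro D
  induction D with
  | nil => simp
  | cons d D ih =>
    intro m
    simp only [List.reverse_cons, List.foldl_append, List.foldl_cons, List.foldl_nil,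
      List.foldl_cons, ih]
    rw [← swap]

theorem magic_iff (x : Int) (hx : 1 ≤ x) :
    isMagicA x = true ↔
      (∀ i : Nat, i ≤ (Nat.digits 10 x.toNat).foldl max 0 → (Nat.digits 10 x.toNat).count i = i) := by
  have habs : |x| = x := abs_of_pos (by omega)
  have hpos : 0 < x.toNat := by omega
  have hlt : ∀ d ∈ Nat.digits 10 x.toNat, d < 10 := fun d hd => Nat.digits_lt_base (by norm_num) hd
  set E := Nat.digits 10 x.toNat with hE
  set M := E.foldl max 0 with hM
  have hM9 : M ≤ 9 := foldl_max_le E 0 9 (fun d hd => by have := hlt d hd; omega) (by omega)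
  have hchars : (PySem.Int.toStr |x|).toList = (E.reverse.map Nat.digitChar) := by
    rw [habs, PySem.Int.toList_toStr, PySem.Int.toChars]
    rw [if_neg (by omega)]
    rw [Nat.toDigits, toDigitsCore_eq _ _ _ hpos (by
      calc x.toNat < 10 ^ x.toNat := Nat.lt_pow_self (by norm_num)
      _ ≤ 10 ^ (x.toNat + 1) := Nat.pow_le_pow_right (by norm_num) (by omega))]
    simp [List.map_reverse, ← hE]
  have hrev10 : ∀ d ∈ E.reverse, d < 10 := by
    intro d hd; exact hlt d (List.mem_reverse.mp hd)
  obtain ⟨hl, hc, hm⟩ := fold_char E.reverse hrev10 (List.replicate 10 (0 : Int)) (by simp) 0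
  rw [isMagicA]
  rw [hchars]
  have hcf := castfold E.reverse 0
  rw [Nat.cast_zero] at hcf
  rw [hm, hcf, revfold]
  have htn : (((E.foldl max 0 : Nat) : Int)).toNat = M := by simp [hM]
  rw [htn]
  rw [List.all_eq_true]
  have hrep : ∀ j : Nat, j < 10 → (List.replicate 10 (0:Int)).getD j 0 = 0 := by
    intro j hj; interval_cases j <;> rfl
  constructor
  · intro h i hi
    have h' := h i (List.mem_range.mpr (by omega))
    rw [hc i (by omega), hrep i (by omega), List.count_reverse] at h'
    have h2 : ((0 : Int) + (E.count i : Int)) = (i : Int) := beq_iff_eq.mp h'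
    omega
  · intro h i hi
    have hi' : i < M + 1 := List.mem_range.mp hi
    rw [hc i (by omega), hrep i (by omega), List.count_reverse]
    have := h i (by omega)
    exact beq_iff_eq.mpr (by omega)

-- ---------- Part 1: the lexicographic enumeration of one block ----------

-- big-endian value of a digit list, as B accumulates it
def beVal (l : List Nat) : Nat := l.foldl (fun a d => a * 10 + d) 0

-- decrement the count of digit d (1-based) in the counts vector
def decC (c : List Nat) (d : Nat) : List Nat := c.set (d - 1) (c.getD (d - 1) 0 - 1)

-- all permutations of the digit multiset described by counts c, in lexicographic
-- (big-endian) order; fuel = c.sum in every use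
def enumB : Nat → List Nat → List (List Nat)
  | 0, _ => [[]]
  | s + 1, c => (List.range' 1 c.length).flatMap (fun d =>
      if 0 < c.getD (d - 1) 0 then (enumB s (decC c d)).map (fun l => d :: l) else [])

def canonCnt (m : Nat) : List Nat := List.range' 1 m

theorem getD_set_self (c : List Nat) (i : Nat) (a : Nat) (h : i < c.length) :
    (c.set i a).getD i 0 = a := by
  rw [List.getD_eq_getElem?_getD, List.getElem?_set_self h]; simp

theorem getD_set_ne (c : List Nat) (i j : Nat) (a : Nat) (h : i ≠ j) :
    (c.set i a).getD j 0 = c.getD j 0 := by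
  rw [List.getD_eq_getElem?_getD, List.getElem?_set_ne h, ← List.getD_eq_getElem?_getD]

theorem getD_mem (c : List Nat) (i : Nat) (h : i < c.length) : c.getD i 0 ∈ c := by
  rw [List.getD_eq_getElem?_getD, List.getElem?_eq_getElem h]
  exact List.getElem_mem h

theorem sum_set : ∀ (c : List Nat) (i : Nat) (a : Nat), i < c.length →
    (c.set i a).sum + c.getD i 0 = c.sum + a := by
  intro c
  induction c with
  | nil => simp
  | cons x t ih =>
    intro i a h
    cases i with
    | zero => simp [List.getD]; omega
    | succ i =>
      simp only [List.set_cons_succ, List.sum_cons, List.getD_cons_succ]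
      have := ih i a (by simpa using h)
      omega

theorem prod_map_set : ∀ (c : List Nat) (f : Nat → Nat) (i : Nat) (a : Nat), i < c.length →
    ((c.set i a).map f).prod * f (c.getD i 0) = (c.map f).prod * f a := by
  intro c f
  induction c with
  | nil => simp
  | cons x t ih =>
    intro i a h
    cases i with
    | zero => simp [List.getD]; ring
    | succ i =>
      simp only [List.set_cons_succ, List.map_cons, List.prod_cons, List.getD_cons_succ]
      have := ih i a (by simpa using h)
      calc f x * ((t.set i a).map f).prod * f (t.getD i 0)
          = f x * (((t.set i a).map f).prod * f (t.getD i 0)) := by ring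
        _ = f x * ((t.map f).prod * f a) := by rw [this]
        _ = f x * (t.map f).prod * f a := by ring

theorem sum_map_mul_right' : ∀ (l : List Nat) (f : Nat → Nat) (r : Nat),
    List.sum (List.map (fun i => f i * r) l) = List.sum (List.map f l) * r := by
  intro l f r
  induction l with
  | nil => simp
  | cons x t ih => simp [ih]; ring

theorem eq_zero_of_sum_zero (c : List Nat) (h : c.sum = 0) : ∀ x ∈ c, x = 0 := by
  intro x hx
  induction c with
  | nil => simp at hx
  | cons y t ih =>
    simp only [List.sum_cons] at h
    rcases List.mem_cons.mp hx with h1 | h1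
    · omega
    · exact ih (by omega) h1

theorem sum_getD_range' : ∀ (c : List Nat), ((List.range' 1 c.length).map (fun d => c.getD (d-1) 0)).sum = c.sum := by
  intro c
  induction c with
  | nil => simp
  | cons x t ih =>
    have hsh : List.range' 2 t.length = (List.range' 1 t.length).map (1 + ·) := by
      rw [List.map_add_range']
    simp only [List.length_cons, List.range'_succ, List.map_cons, List.sum_cons, hsh, List.map_map]
    have : ∀ d ∈ List.range' 1 t.length,
        ((fun d => (x :: t).getD (d-1) 0) ∘ (1 + ·)) d = t.getD (d-1) 0 := by
      intro d hd
      have h1 : 1 ≤ d := (List.mem_range'_1.mp hd).1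
      simp only [Function.comp]
      have : 1 + d - 1 = (d - 1) + 1 := by omega
      rw [this]; rfl
    rw [List.map_congr_left this, ih]; rfl

theorem beVal_acc : ∀ (l : List Nat) (a : Nat), l.foldl (fun a d => a * 10 + d) a = a * 10 ^ l.length + beVal l := by
  intro l
  induction l with
  | nil => intro a; simp [beVal]
  | cons d t ih =>
    intro a
    have h1 : beVal (d :: t) = d * 10 ^ t.length + beVal t := by
      show List.foldl _ (0*10+d) t = _
      rw [ih (0*10+d)]; ring_nf
    simp only [List.foldl_cons, List.length_cons, h1, ih (a*10+d)]
    ring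

theorem beVal_cons (d : Nat) (t : List Nat) : beVal (d :: t) = d * 10 ^ t.length + beVal t := by
  show List.foldl _ (0*10+d) t = _
  rw [beVal_acc]; ring_nf

theorem beVal_lt : ∀ (l : List Nat), (∀ d ∈ l, d ≤ 9) → beVal l < 10 ^ l.length := by
  intro l
  induction l with
  | nil => intro _; simp [beVal]
  | cons d t ih =>
    intro h
    have h2 := ih (fun x hx => h x (by simp [hx]))
    have h3 := h d (by simp)
    have he : (10:Nat) ^ (d :: t).length = 10 * 10 ^ t.length := by rw [List.length_cons]; ring
    rw [beVal_cons, he]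
    nlinarith

-- ---- length of members ----

theorem beVal_ge : ∀ (l : List Nat), l ≠ [] → (∀ d ∈ l, 1 ≤ d) → 10 ^ (l.length - 1) ≤ beVal l := by
  intro l hne h
  match l with
  | d :: t =>
    have h3 := h d (by simp)
    simp only [List.length_cons, Nat.add_sub_cancel, beVal_cons]
    nlinarith [pow_pos (by norm_num : (0:Nat) < 10) t.length, Nat.zero_le (beVal t)]

theorem len_enumB_mul_fact : ∀ (s : Nat) (c : List Nat), c.sum = s →
    (enumB s c).length * (c.map Nat.factorial).prod = Nat.factorial s := by
  intro s
  induction s with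
  | zero =>
    intro c h
    have : ∀ y ∈ c.map Nat.factorial, y = 1 := by
      intro y hy
      obtain ⟨x, hx, rfl⟩ := List.mem_map.mp hy
      rw [eq_zero_of_sum_zero c h x hx]; rfl
    rw [enumB, List.prod_eq_one this]
    simp [Nat.factorial]
  | succ s ih =>
    intro c h
    rw [enumB, List.length_flatMap]
    -- pointwise: length of term d times prod = s! * c_d
    have key : ∀ d ∈ List.range' 1 c.length,
        ((fun d => (if 0 < c.getD (d - 1) 0 then (enumB s (decC c d)).map (fun l => d :: l) else []).length) d)
          * (c.map Nat.factorial).prod = Nat.factorial s * c.getD (d-1) 0 := by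
      intro d hd
      obtain ⟨h1, h2⟩ := List.mem_range'_1.mp hd
      have hidx : d - 1 < c.length := by omega
      by_cases hp : 0 < c.getD (d - 1) 0
      · simp only [hp, if_true, List.length_map]
        have hsum : (decC c d).sum = s := by
          unfold decC
          have := sum_set c (d-1) (c.getD (d - 1) 0 - 1) hidx
          omega
        set v := c.getD (d-1) 0 with hv
        have hih := ih (decC c d) hsum
        have hprod := prod_map_set c Nat.factorial (d-1) (v-1) hidx
        -- prod over dec * v! = prod * (v-1)!
        have hfact : Nat.factorial v = v * Nat.factorial (v - 1) := by
          have : v = (v-1) + 1 := by omega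
          rw [this, Nat.factorial_succ]
          simp
        -- multiply hih by v!
        have h3 : (enumB s (decC c d)).length * (((decC c d).map Nat.factorial).prod * Nat.factorial v)
            = Nat.factorial s * Nat.factorial v := by
          rw [← mul_assoc, hih]
        rw [show ((decC c d).map Nat.factorial).prod * Nat.factorial v
              = (c.map Nat.factorial).prod * Nat.factorial (v-1) from by
            unfold decC; rw [← hv, ← prod_map_set c Nat.factorial (d-1) (v-1) hidx]] at h3
        have h4 : (enumB s (decC c d)).length * (c.map Nat.factorial).prod * Nat.factorial (v-1)
            = Nat.factorial s * v * Nat.factorial (v-1) := by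
          have e1 : (enumB s (decC c d)).length * (c.map Nat.factorial).prod * Nat.factorial (v-1)
              = (enumB s (decC c d)).length * ((c.map Nat.factorial).prod * Nat.factorial (v-1)) := by ring
          have e2 : Nat.factorial s * v * Nat.factorial (v-1) = Nat.factorial s * Nat.factorial v := by
            rw [hfact]; ring
          rw [e1, h3, e2]
        have hpos : 0 < Nat.factorial (v-1) := Nat.factorial_pos _
        exact Nat.eq_of_mul_eq_mul_right hpos h4
      · simp only [hp, if_false, List.length_nil, Nat.zero_mul]
        have : c.getD (d-1) 0 = 0 := by omega
        rw [this, Nat.mul_zero]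
    calc ((List.range' 1 c.length).map fun d =>
            (if 0 < c.getD (d - 1) 0 then (enumB s (decC c d)).map (fun l => d :: l) else []).length).sum
          * (c.map Nat.factorial).prod
        = ((List.range' 1 c.length).map fun d =>
            (if 0 < c.getD (d - 1) 0 then (enumB s (decC c d)).map (fun l => d :: l) else []).length
              * (c.map Nat.factorial).prod).sum := by
          rw [sum_map_mul_right']
      _ = ((List.range' 1 c.length).map fun d => Nat.factorial s * c.getD (d-1) 0).sum := by
          rw [List.map_congr_left key]
      _ = Nat.factorial s * ((List.range' 1 c.length).map fun d => c.getD (d-1) 0).sum := by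
          rw [List.sum_map_mul_left]
      _ = Nat.factorial (s+1) := by
          rw [sum_getD_range', h, Nat.factorial_succ]
          ring

theorem length_mem_enumB : ∀ (s : Nat) (c : List Nat), ∀ l ∈ enumB s c, l.length = s := by
  intro s
  induction s with
  | zero => intro c l hl; rw [enumB] at hl; simp at hl; simp [hl]
  | succ s ih =>
    intro c l hl
    rw [enumB] at hl
    obtain ⟨d, _, hl2⟩ := List.mem_flatMap.mp hl
    by_cases hp : 0 < c.getD (d - 1) 0
    · rw [if_pos hp] at hl2
      obtain ⟨t, ht, rfl⟩ := List.mem_map.mp hl2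
      simp [ih _ t ht]
    · rw [if_neg hp] at hl2; simp at hl2

-- ---- membership characterisation ----

theorem mem_enumB : ∀ (s : Nat) (c : List Nat), c.sum = s → ∀ (l : List Nat),
    (l ∈ enumB s c ↔ ((∀ d ∈ l, 1 ≤ d ∧ d ≤ c.length) ∧
      ∀ d : Nat, 1 ≤ d → d ≤ c.length → l.count d = c.getD (d-1) 0)) := by
  intro s
  induction s with
  | zero =>
    intro c hsum l
    rw [enumB]
    simp only [List.mem_singleton]
    constructor
    · rintro rfl
      refine ⟨by simp, fun d h1 h2 => ?_⟩
      have : c.getD (d-1) 0 ∈ c := getD_mem c _ (by omega)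
      rw [List.count_nil]
      exact (eq_zero_of_sum_zero c hsum _ this).symm
    · rintro ⟨h1, h2⟩
      cases l with
      | nil => rfl
      | cons x t =>
        obtain ⟨hx1, hx2⟩ := h1 x (by simp)
        have hc := h2 x hx1 hx2
        have : c.getD (x-1) 0 ∈ c := getD_mem c _ (by omega)
        have h0 : c.getD (x-1) 0 = 0 := eq_zero_of_sum_zero c hsum _ this
        rw [h0] at hc
        simp [List.count_cons] at hc
  | succ s ih =>
    intro c hsum l
    rw [enumB]
    constructor
    · intro hl
      obtain ⟨d, hd, hl2⟩ := List.mem_flatMap.mp hl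
      obtain ⟨hd1, hd2⟩ := List.mem_range'_1.mp hd
      have hdlen : d - 1 < c.length := by omega
      by_cases hp : 0 < c.getD (d - 1) 0
      case neg => rw [if_neg hp] at hl2; simp at hl2
      · rw [if_pos hp] at hl2
        obtain ⟨t, ht, rfl⟩ := List.mem_map.mp hl2
        have hdec : (decC c d).sum = s := by
          unfold decC
          have := sum_set c (d-1) (c.getD (d - 1) 0 - 1) hdlen
          omega
        obtain ⟨m1, m2⟩ := (ih (decC c d) hdec t).mp ht
        have hlen : (decC c d).length = c.length := by simp [decC]
        refine ⟨?_, ?_⟩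
        · intro e he
          rcases List.mem_cons.mp he with rfl | he2
          · omega
          · have := m1 e he2; omega
        · intro e he1 he2
          have hcnt := m2 e he1 (by omega)
          by_cases hed : e = d
          · subst hed
            rw [List.count_cons_self, hcnt]
            unfold decC
            rw [getD_set_self c _ _ hdlen]
            omega
          · rw [List.count_cons_of_ne (by exact fun h => hed h.symm) , hcnt]
            unfold decC
            rw [getD_set_ne c _ _ _ (by omega)]
    · rintro ⟨h1, h2⟩
      cases l with
      | nil =>
        exfalso
        have : c.sum = 0 := by
          rw [← sum_getD_range' c]
          apply List.sum_eq_zero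
          intro y hy
          obtain ⟨d, hd, rfl⟩ := List.mem_map.mp hy
          obtain ⟨hd1, hd2⟩ := List.mem_range'_1.mp hd
          have := h2 d hd1 (by omega)
          rw [List.count_nil] at this
          omega
        omega
      | cons x t =>
        obtain ⟨hx1, hx2⟩ := h1 x (by simp)
        have hxc : 0 < c.getD (x-1) 0 := by
          have := h2 x hx1 hx2
          have hcnt : 0 < (x :: t).count x := by simp
          omega
        have hdlen : x - 1 < c.length := by omega
        have hdec : (decC c x).sum = s := by
          unfold decC
          have := sum_set c (x-1) (c.getD (x - 1) 0 - 1) hdlen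
          omega
        have hlen : (decC c x).length = c.length := by simp [decC]
        apply List.mem_flatMap.mpr
        refine ⟨x, List.mem_range'_1.mpr ⟨hx1, by omega⟩, ?_⟩
        rw [if_pos hxc]
        apply List.mem_map.mpr
        refine ⟨t, ?_, rfl⟩
        apply (ih (decC c x) hdec t).mpr
        refine ⟨fun e he => by have := h1 e (by simp [he]); omega, ?_⟩
        intro e he1 he2
        rw [hlen] at he2
        have hcnt := h2 e he1 he2
        by_cases hed : e = x
        · subst hed
          rw [List.count_cons_self] at hcnt
          unfold decC
          rw [getD_set_self c _ _ hdlen]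
          omega
        · rw [List.count_cons_of_ne (fun h => hed h.symm)] at hcnt
          unfold decC
          rw [getD_set_ne c _ _ _ (by omega), hcnt]

-- ---- sortedness ----

theorem pairwise_enumB : ∀ (s : Nat) (c : List Nat), c.sum = s → c.length ≤ 9 →
    ((enumB s c).map beVal).Pairwise (· < ·) := by
  intro s
  induction s with
  | zero => intro c _ _; rw [enumB]; simp
  | succ s ih =>
    intro c hsum hlen
    rw [enumB, List.map_flatMap, List.flatMap_def]
    apply List.pairwise_flatten.mpr
    have hblock : ∀ d, 1 ≤ d → d ≤ c.length → 0 < c.getD (d - 1) 0 →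
        ∀ t ∈ enumB s (decC c d), beVal (d :: t) = d * 10 ^ s + beVal t ∧ beVal t < 10 ^ s := by
      intro d hd1 hd2 hp t ht
      have hdlen : d - 1 < c.length := by omega
      have hdec : (decC c d).sum = s := by
        unfold decC
        have := sum_set c (d-1) (c.getD (d - 1) 0 - 1) hdlen
        omega
      have hm := (mem_enumB s (decC c d) hdec t).mp ht
      have hlt : beVal t < 10 ^ s := by
        have := beVal_lt t (fun e he => by
          have h1 := (hm.1 e he).2
          simp only [decC, List.length_set] at h1
          omega)
        rwa [length_mem_enumB s _ t ht] at this
      exact ⟨by rw [beVal_cons, length_mem_enumB s _ t ht], hlt⟩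
    refine ⟨?_, ?_⟩
    · intro bl hbl
      simp only [List.map_map, List.mem_map] at hbl
      obtain ⟨d, hd, rfl⟩ := hbl
      obtain ⟨hd1, hd2⟩ := List.mem_range'_1.mp hd
      split
      case isTrue hp =>
        have hdlen : d - 1 < c.length := by omega
        have hdec : (decC c d).sum = s := by
          unfold decC
          have := sum_set c (d-1) (c.getD (d - 1) 0 - 1) hdlen
          omega
        have hIH := ih (decC c d) hdec (by simp [decC]; omega)
        rw [List.map_map]
        have hfix : ∀ t ∈ enumB s (decC c d), (beVal ∘ fun l => d :: l) t = ((fun v => d * 10 ^ s + v) ∘ beVal) t := by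
          intro t ht
          simp only [Function.comp]
          exact (hblock d hd1 (by omega) hp t ht).1
        rw [List.map_congr_left hfix, ← List.map_map]
        exact List.Pairwise.map _ (fun a b hab => Nat.add_lt_add_left hab _) hIH
      case isFalse => simp
    · apply (List.pairwise_map).mpr
      have hr : (List.range' 1 c.length).Pairwise (· < ·) := List.pairwise_lt_range'
      apply List.Pairwise.imp_of_mem ?_ hr
      intro d d' hd hd' hdd'
      intro a ha b hb
      obtain ⟨hd1, hd2⟩ := List.mem_range'_1.mp hd
      obtain ⟨hd1', hd2'⟩ := List.mem_range'_1.mp hd'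
      revert ha
      split
      case isFalse => simp
      intro ha
      revert hb
      split
      case isFalse => simp
      intro hb
      case isTrue hp hp' =>
        simp only [List.map_map, List.mem_map] at ha hb
        obtain ⟨t, ht, rfl⟩ := ha
        obtain ⟨u, hu, rfl⟩ := hb
        simp only [Function.comp]
        obtain ⟨he1, hl1⟩ := hblock d hd1 (by omega) hp t ht
        obtain ⟨he2, _⟩ := hblock d' hd1' (by omega) hp' u hu
        rw [he1, he2]
        have : (d + 1) * 10 ^ s ≤ d' * 10 ^ s := Nat.mul_le_mul_right _ (by omega)
        nlinarith [Nat.zero_le (beVal u)]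

theorem digits_beVal : ∀ (l : List Nat), (∀ d ∈ l, 1 ≤ d ∧ d ≤ 9) →
    Nat.digits 10 (beVal l) = l.reverse := by
  intro l
  induction l using List.reverseRecOn with
  | nil => intro _; simp [beVal]
  | append_singleton t d ih =>
    intro h
    have hd : 1 ≤ d ∧ d ≤ 9 := h d (by simp)
    have hb : beVal (t ++ [d]) = beVal t * 10 + d := by
      unfold beVal
      rw [List.foldl_append]
      simp
    rw [hb]
    cases t with
    | nil =>
      simp [beVal]
      rw [Nat.digits_def' (by norm_num : 1 < 10) (by omega), Nat.mod_eq_of_lt (by omega),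
        Nat.div_eq_of_lt (by omega)]
      simp
    | cons x u =>
      have hpos : 1 ≤ beVal (x :: u) := by
        have h10 : (10:Nat) ^ ((x :: u).length - 1) ≥ 1 := Nat.one_le_pow _ _ (by norm_num)
        have := beVal_ge (x :: u) (by simp) (fun e he => (h e (by rcases List.mem_cons.mp he with h1|h1 <;> simp [h1])).1)
        omega
      rw [Nat.digits_def' (by norm_num : 1 < 10) (by omega)]
      have hm : (beVal (x :: u) * 10 + d) % 10 = d := by omega
      have hdv : (beVal (x :: u) * 10 + d) / 10 = beVal (x :: u) := by omega
      rw [hm, hdv, ih (fun e he => h e (by rcases List.mem_cons.mp he with h1|h1 <;> simp [h1]))]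
      simp

theorem beVal_reverse_ofDigits : ∀ (E : List Nat), beVal E.reverse = Nat.ofDigits 10 E := by
  intro E
  induction E with
  | nil => simp [beVal]
  | cons d t ih =>
    have hb : beVal (t.reverse ++ [d]) = beVal t.reverse * 10 + d := by
      unfold beVal
      rw [List.foldl_append]
      simp
    simp only [List.reverse_cons, hb, ih, Nat.ofDigits_cons]
    ring


-- ---------- Part 2: the full sorted list of magic numbers ----------

def blockInt (m : Nat) : List Int :=
  ((enumB (canonCnt m).sum (canonCnt m)).map beVal).map (fun v : Nat => (v : Int))

def bigL : List Int := (List.range' 1 9).flatMap blockInt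

theorem canonCnt_length (m : Nat) : (canonCnt m).length = m := by simp [canonCnt]

theorem canonCnt_getD (m d : Nat) (h1 : 1 ≤ d) (h2 : d ≤ m) : (canonCnt m).getD (d-1) 0 = d := by
  unfold canonCnt
  rw [List.getD_eq_getElem?_getD, List.getElem?_eq_getElem (by simp; omega)]
  simp [List.getElem_range']
  omega

theorem sum_range'_lt (m m' : Nat) (h : m < m') : (List.range' 1 m).sum < (List.range' 1 m').sum := by
  have hsplit : List.range' 1 m' = List.range' 1 m ++ List.range' (1 + m) (m' - m) := by
    rw [show m' = m + (m'-m) by omega, ← List.range'_append_1]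
    have he : m + (m'-m) - m = m' - m := by omega
    rw [he]
  rw [hsplit, List.sum_append]
  have hmem : (1 + m) ∈ List.range' (1+m) (m'-m) := List.mem_range'_1.mpr ⟨le_refl _, by omega⟩
  have := List.single_le_sum (fun x _ => Nat.zero_le x) _ hmem
  omega

theorem sum_canonCnt_le (m : Nat) (h : m ≤ 9) : (canonCnt m).sum ≤ 45 := by
  rcases Nat.lt_or_ge m 9 with hm | hm
  · have := sum_range'_lt m 9 hm
    have h9 : (List.range' 1 9).sum = 45 := by decide
    unfold canonCnt
    omega
  · have : m = 9 := by omega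
    subst this
    decide

theorem mem_blockInt (m : Nat) (x : Int) (hm1 : 1 ≤ m) (hm9 : m ≤ 9) :
    x ∈ blockInt m ↔ ∃ l ∈ enumB (canonCnt m).sum (canonCnt m), x = ((beVal l : Nat) : Int) := by
  unfold blockInt
  rw [List.map_map]
  constructor
  · intro hx
    obtain ⟨l, hl, rfl⟩ := List.mem_map.mp hx
    exact ⟨l, hl, rfl⟩
  · rintro ⟨l, hl, rfl⟩
    exact List.mem_map.mpr ⟨l, hl, rfl⟩

theorem magic_iff_mem_bigL : ∀ (x : Int), 1 ≤ x → (isMagicA x = true ↔ x ∈ bigL) := by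
  intro x hx
  rw [magic_iff x hx]
  set E := Nat.digits 10 x.toNat with hE
  set M := E.foldl max 0 with hM
  have hxt : x.toNat ≠ 0 := by omega
  have hEne : E ≠ [] := by rw [hE]; simpa [Nat.digits_ne_nil_iff_ne_zero] using hxt
  have hlt : ∀ d ∈ E, d < 10 := fun d hd => Nat.digits_lt_base (by norm_num) hd
  have hM9 : M ≤ 9 := foldl_max_le E 0 9 (fun d hd => by have := hlt d hd; omega) (by omega)
  constructor
  · intro hcnt
    have hM1 : 1 ≤ M := by
      by_contra hM0
      have hM0' : M = 0 := by omega
      obtain ⟨e, he⟩ := List.exists_mem_of_ne_nil E hEne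
      have heM : e ≤ M := foldl_max_mem E 0 e he
      have he0 : e = 0 := by omega
      have := hcnt 0 (by omega)
      rw [List.count_eq_zero] at this
      exact this (he0 ▸ he)
    have hzero : 0 ∉ E := by
      have := hcnt 0 (by omega)
      intro h0
      have := List.count_pos_iff.mpr h0
      omega
    have hmem : E.reverse ∈ enumB (canonCnt M).sum (canonCnt M) := by
      apply (mem_enumB _ (canonCnt M) rfl E.reverse).mpr
      rw [canonCnt_length]
      refine ⟨?_, ?_⟩
      · intro d hd
        have hdE : d ∈ E := List.mem_reverse.mp hd
        have : d ≤ M := foldl_max_mem E 0 d hdE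
        have : d ≠ 0 := fun h0 => hzero (h0 ▸ hdE)
        omega
      · intro d hd1 hd2
        rw [List.count_reverse, canonCnt_getD M d hd1 hd2]
        exact hcnt d (by omega)
    apply List.mem_flatMap.mpr
    refine ⟨M, List.mem_range'_1.mpr ⟨hM1, by omega⟩, ?_⟩
    apply (mem_blockInt M x hM1 hM9).mpr
    refine ⟨E.reverse, hmem, ?_⟩
    rw [beVal_reverse_ofDigits E, hE, Nat.ofDigits_digits]
    omega
  · intro hmem
    obtain ⟨m, hmr, hxb⟩ := List.mem_flatMap.mp hmem
    obtain ⟨hm1, hm2⟩ := List.mem_range'_1.mp hmr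
    obtain ⟨l, hl, rfl⟩ := (mem_blockInt m x hm1 (by omega)).mp hxb
    obtain ⟨hel, hcl⟩ := (mem_enumB _ (canonCnt m) rfl l).mp hl
    rw [canonCnt_length] at hel hcl
    have hlne : l ≠ [] := by
      intro h0
      have := hcl m hm1 (le_refl m)
      rw [h0, List.count_nil, canonCnt_getD m m hm1 (le_refl m)] at this
      omega
    have hdg : Nat.digits 10 ((beVal l : Nat) : Int).toNat = l.reverse := by
      rw [Int.toNat_natCast]
      exact digits_beVal l (fun d hd => ⟨(hel d hd).1, by have := (hel d hd).2; omega⟩)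
    have hEl : E = l.reverse := by rw [hE]; exact hdg
    intro i hi
    rw [hM, hEl] at hi
    rw [hEl, List.count_reverse]
    have hMle : l.reverse.foldl max 0 ≤ m :=
      foldl_max_le l.reverse 0 m (fun d hd => (hel d (List.mem_reverse.mp hd)).2) (by omega)
    by_cases hi0 : i = 0
    · subst hi0
      rw [List.count_eq_zero]
      intro h0
      have := (hel 0 h0).1
      omega
    · have : 1 ≤ i := by omega
      rw [hcl i this (by omega), canonCnt_getD m i this (by omega)]

theorem blockInt_facts (m : Nat) (hm1 : 1 ≤ m) (hm9 : m ≤ 9) :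
    ∀ x ∈ blockInt m, ((10:Int) ^ ((canonCnt m).sum - 1) ≤ x ∧ x < (10:Int) ^ (canonCnt m).sum) := by
  intro x hxb
  obtain ⟨l, hl, rfl⟩ := (mem_blockInt m x hm1 hm9).mp hxb
  obtain ⟨hel, hcl⟩ := (mem_enumB _ (canonCnt m) rfl l).mp hl
  rw [canonCnt_length] at hel hcl
  have hlen : l.length = (canonCnt m).sum := length_mem_enumB _ _ l hl
  have hlne : l ≠ [] := by
    intro h0
    have := hcl m hm1 (le_refl m)
    rw [h0, List.count_nil, canonCnt_getD m m hm1 (le_refl m)] at this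
    omega
  have hlow : 10 ^ ((canonCnt m).sum - 1) ≤ beVal l := by
    have := beVal_ge l hlne (fun d hd => (hel d hd).1)
    rwa [hlen] at this
  have hhigh : beVal l < 10 ^ (canonCnt m).sum := by
    have := beVal_lt l (fun d hd => by have := (hel d hd).2; omega)
    rwa [hlen] at this
  constructor
  · calc ((10:Int) ^ ((canonCnt m).sum - 1)) = ((10 ^ ((canonCnt m).sum - 1) : Nat) : Int) := by push_cast; ring
      _ ≤ _ := by exact_mod_cast hlow
  · calc ((beVal l : Nat) : Int) < ((10 ^ (canonCnt m).sum : Nat) : Int) := by exact_mod_cast hhigh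
      _ = (10:Int) ^ (canonCnt m).sum := by push_cast; ring

theorem pairwise_bigL : bigL.Pairwise (· < ·) := by
  unfold bigL
  rw [List.flatMap_def]
  apply List.pairwise_flatten.mpr
  refine ⟨?_, ?_⟩
  · intro bl hbl
    obtain ⟨m, hmr, rfl⟩ := List.mem_map.mp hbl
    obtain ⟨hm1, hm2⟩ := List.mem_range'_1.mp hmr
    unfold blockInt
    rw [List.map_map]
    have hpw := pairwise_enumB _ (canonCnt m) rfl (by rw [canonCnt_length]; omega)
    rw [← List.map_map]
    exact List.Pairwise.map _ (fun a b hab => by exact_mod_cast hab) hpw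
  · apply (List.pairwise_map).mpr
    have hr : (List.range' 1 9).Pairwise (· < ·) := List.pairwise_lt_range'
    apply List.Pairwise.imp_of_mem ?_ hr
    intro m m' hm hm' hmm' a ha b hb
    obtain ⟨hm1, hm2⟩ := List.mem_range'_1.mp hm
    obtain ⟨hm1', hm2'⟩ := List.mem_range'_1.mp hm'
    obtain ⟨_, ha2⟩ := blockInt_facts m hm1 (by omega) a ha
    obtain ⟨hb1, _⟩ := blockInt_facts m' hm1' (by omega) b hb
    have hT : (canonCnt m).sum < (canonCnt m').sum := sum_range'_lt m m' hmm'
    have hpow : (10:Int) ^ (canonCnt m).sum ≤ (10:Int) ^ ((canonCnt m').sum - 1) :=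
      pow_le_pow_right₀ (by norm_num) (by omega)
    omega

theorem bigL_bounds : ∀ x ∈ bigL, 0 < x ∧ x ≤ 1000000000000000000000000000000000000000000000 := by
  intro x hx
  obtain ⟨m, hmr, hxb⟩ := List.mem_flatMap.mp hx
  obtain ⟨hm1, hm2⟩ := List.mem_range'_1.mp hmr
  obtain ⟨hlow, hhigh⟩ := blockInt_facts m hm1 (by omega) x hxb
  have h1 : (0:Int) < 10 ^ ((canonCnt m).sum - 1) := pow_pos (by norm_num) _
  have hs45 : (canonCnt m).sum ≤ 45 := sum_canonCnt_le m (by omega)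
  have hpow : (10:Int) ^ (canonCnt m).sum ≤ (10:Int) ^ 45 :=
    pow_le_pow_right₀ (by norm_num) hs45
  have : (10:Int) ^ 45 = 1000000000000000000000000000000000000000000000 := by norm_num
  omega

theorem bigL_length_ge : 2147483648 ≤ bigL.length := by
  have h6 : 2147483648 ≤ (blockInt 6).length := by
    have hs : (canonCnt 6).sum = 21 := by decide
    have hkey := len_enumB_mul_fact 21 (canonCnt 6) hs
    have hprod : ((canonCnt 6).map Nat.factorial).prod = 24883200 := by decide
    have hfact : Nat.factorial 21 = 51090942171709440000 := by norm_num [Nat.factorial]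
    rw [hprod, hfact] at hkey
    have hlen : (blockInt 6).length = (enumB (canonCnt 6).sum (canonCnt 6)).length := by
      unfold blockInt
      simp
    rw [hlen, hs]
    omega
  unfold bigL
  rw [List.length_flatMap]
  have hmem : (blockInt 6).length ∈ (List.range' 1 9).map (fun m => (blockInt m).length) :=
    List.mem_map.mpr ⟨6, by decide, rfl⟩
  have := List.single_le_sum (fun x _ => Nat.zero_le x) _ hmem
  omega

-- ---------- Part 3: A's scan walks bigL ----------

theorem goA_nonpos (f : Nat) (n r : Int) (h : ¬ n > 0) : goA f n r = r := by
  cases f <;> simp [goA, h]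

theorem goA_walk : ∀ (f : Nat) (L : List Int) (n r : Int),
    1 ≤ n → n ≤ L.length →
    (∀ x : Int, r < x → x ≤ r + f → (isMagicA x = true ↔ x ∈ L)) →
    L.Pairwise (· < ·) → (∀ x ∈ L, r < x ∧ x ≤ r + f) →
    goA f n r = L.getD (n - 1).toNat 0 := by
  intro f
  induction f with
  | zero =>
    intro L n r h1 h2 _ _ hb
    match L with
    | [] => simp at h2; omega
    | a :: t => have := hb a (by simp); omega
  | succ f ih =>
    intro L n r h1 h2 hiff hpw hb
    have hn : n > 0 := by omega
    rw [goA]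
    simp only [hn, if_true]
    by_cases hm : isMagicA (r + 1) = true
    · have hmem : (r + 1) ∈ L := (hiff (r+1) (by omega) (by omega)).mp hm
      match L, hpw, hb, hiff, h2 with
      | a :: t, hpw, hb, hiff, h2 =>
        have ha : a = r + 1 := by
          rcases List.mem_cons.mp hmem with h | h
          · omega
          · have := (List.pairwise_cons.mp hpw).1 _ h
            have := hb a (by simp)
            omega
        simp only [hm, if_true]
        by_cases hone : n = 1
        · subst hone
          rw [goA_nonpos _ _ _ (by omega)]
          simp [ha]
        · have htail := (List.pairwise_cons.mp hpw).1
          have h2' : n - 1 ≤ (t : List Int).length := by simp at h2 ⊢; omega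
          rw [ih t (n-1) (r+1) (by omega) h2'
            (by
              intro x hx1 hx2
              rw [hiff x (by omega) (by omega)]
              constructor
              · intro h; rcases List.mem_cons.mp h with h | h
                · omega
                · exact h
              · intro h; exact List.mem_cons_of_mem _ h)
            (List.pairwise_cons.mp hpw).2
            (by
              intro x hx
              have := htail x hx
              have := hb x (List.mem_cons_of_mem _ hx)
              omega)]
          have : (n - 1).toNat = ((n - 1 - 1).toNat) + 1 := by omega
          rw [this]
          simp
    · have hnm : (r + 1) ∉ L := fun h => hm ((hiff (r+1) (by omega) (by omega)).mpr h)
      rw [Bool.not_eq_true] at hm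
      simp only [hm, Bool.false_eq_true, if_false]
      rw [ih L n (r+1) h1 h2
        (by intro x hx1 hx2; exact hiff x (by omega) (by omega))
        hpw
        (by
          intro x hx
          have := hb x hx
          have : x ≠ r + 1 := fun he => hnm (he ▸ hx)
          omega)]

theorem A_eval (n : Int) (h1 : 1 ≤ n) (h2 : n ≤ 2147483648) :
    nth_magic_number n = bigL.getD (n - 1).toNat 0 := by
  rw [nth_magic_number, if_neg (by omega)]
  refine goA_walk _ bigL n 0 h1 (by have := bigL_length_ge; omega)
    (fun x hx1 _ => magic_iff_mem_bigL x (by omega)) pairwise_bigL ?_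
  intro x hx
  have := bigL_bounds x hx
  constructor <;> [exact this.1; exact le_trans this.2 (by norm_num)]

-- ---------- Part 4: B unranks bigL ----------

theorem set_getD_self : ∀ (c : List Nat) (i : Nat), i < c.length → c.set i (c.getD i 0) = c := by
  intro c
  induction c with
  | nil => simp
  | cons x t ih =>
    intro i h
    cases i with
    | zero => simp [List.getD]
    | succ i => simp only [List.getD_cons_succ, List.set_cons_succ]; rw [ih i (by simpa using h)]

theorem getD_map_of_lt {α β : Type} (f : α → β) (l : List α) (k : Nat) (da : α) (db : β)
    (h : k < l.length) : (l.map f).getD k db = f (l.getD k da) := by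
  rw [List.getD_eq_getElem?_getD, List.getElem?_eq_getElem (by simpa using h),
    List.getD_eq_getElem?_getD, List.getElem?_eq_getElem h]
  simp

theorem factB_nat : ∀ (n : Nat), factB (n : Int) = (Nat.factorial n : Int) := by
  intro n
  induction n with
  | zero => rw [factB, PySem.List.pyRange_one_eq_nil (by norm_num)]; rfl
  | succ n ih =>
    cases n with
    | zero => rw [factB, PySem.List.pyRange_one_eq_nil (by norm_num)]; rfl
    | succ p =>
      rw [factB]
      have hcast : ((p + 2 : Nat) : Int) + 1 = ((p:Int) + 2) + 1 := by push_cast; ring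
      have hsplit : PySem.List.pyRange 2 (((p + 2 : Nat) : Int) + 1) 1
          = PySem.List.pyRange 2 ((p:Int) + 2) 1 ++ [(p:Int) + 2] := by
        rw [hcast]
        exact PySem.List.pyRange_one_succ_right (by omega)
      rw [hsplit, List.foldl_append]
      have : ((p + 1 : Nat) : Int) + 1 = (p:Int) + 2 := by push_cast; ring
      rw [factB, this] at ih
      rw [ih]
      rw [show Nat.factorial (p+2) = Nat.factorial (p+1) * (p+2) by
        rw [Nat.factorial_succ]; ring]
      simp only [List.foldl_cons, List.foldl_nil]
      push_cast
      ring

theorem foldl_add_cast : ∀ (c : List Nat) (a : Int),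
    (c.map (fun e : Nat => (e : Int))).foldl (· + ·) a = a + (c.sum : Int) := by
  intro c
  induction c with
  | nil => intro a; simp
  | cons x t ih =>
    intro a
    simp only [List.map_cons, List.foldl_cons, List.sum_cons, ih]
    push_cast
    ring

theorem divfold_cast : ∀ (cs : List Nat) (v : Nat),
    (cs.map (fun e : Nat => (e : Int))).foldl (fun f c => PySem.Int.floordiv f (factB c)) (v : Int)
      = ((cs.foldl (fun v c => v / Nat.factorial c) v : Nat) : Int) := by
  intro cs
  induction cs with
  | nil => intro v; simp
  | cons c0 cs ih =>
    intro v
    simp only [List.map_cons, List.foldl_cons]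
    rw [factB_nat c0, PySem.Int.floordiv_natCast]
    exact ih (v / Nat.factorial c0)

theorem natdivfold : ∀ (cs : List Nat) (v : Nat),
    cs.foldl (fun v c => v / Nat.factorial c) v = v / (cs.map Nat.factorial).prod := by
  intro cs
  induction cs with
  | nil => intro v; simp
  | cons c0 cs ih =>
    intro v
    simp only [List.map_cons, List.foldl_cons, List.prod_cons, ih]
    rw [Nat.div_div_eq_div_mul]

theorem multinomialB_eq : ∀ (c : List Nat),
    multinomialB (c.map (fun e : Nat => (e : Int))) = ((enumB c.sum c).length : Int) := by
  intro c
  rw [multinomialB]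
  rw [foldl_add_cast c 0, zero_add, factB_nat, divfold_cast, natdivfold]
  have hkey := len_enumB_mul_fact c.sum c rfl
  have hpos : 0 < (c.map Nat.factorial).prod := by
    apply List.prod_pos
    intro y hy
    obtain ⟨x, _, rfl⟩ := List.mem_map.mp hy
    exact Nat.factorial_pos x
  rw [Nat.div_eq_of_eq_mul_left hpos hkey.symm]

-- evaluate the inner for-d loop against the lexicographic enumeration
theorem inner_lemma : ∀ (ds : List Nat) (c : List Nat) (k : Nat) (r : Int) (s : Nat),
    (∀ d ∈ ds, 1 ≤ d ∧ d ≤ c.length) → c.sum = s + 1 →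
    k < (ds.flatMap (fun d => if 0 < c.getD (d-1) 0 then (enumB s (decC c d)).map (fun l => d :: l) else [])).length →
    ∃ (d k' : Nat), (1 ≤ d ∧ d ≤ c.length) ∧ 0 < c.getD (d-1) 0 ∧ (decC c d).sum = s ∧
      k' < (enumB s (decC c d)).length ∧
      innerB (ds.map (fun e : Nat => (e:Int))) (c.map (fun e : Nat => (e:Int))) (k:Int) r
        = ((decC c d).map (fun e : Nat => (e:Int)), (k':Int), r * 10 + (d:Int)) ∧
      (ds.flatMap (fun d => if 0 < c.getD (d-1) 0 then (enumB s (decC c d)).map (fun l => d :: l) else [])).getD k []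
        = d :: ((enumB s (decC c d)).getD k' []) := by
  intro ds
  induction ds with
  | nil => intro c k r s _ _ hk; simp at hk
  | cons d0 ds ih =>
    intro c k r s hds hsum hk
    obtain ⟨hd01, hd02⟩ := hds d0 (by simp)
    have hidx : d0 - 1 < c.length := by omega
    have htoNat : ((d0:Int) - 1).toNat = d0 - 1 := by omega
    have hgd : (c.map (fun e : Nat => (e:Int))).getD (d0 - 1) 0 = ((c.getD (d0-1) 0 : Nat) : Int) :=
      getD_map_of_lt _ c (d0-1) 0 0 hidx
    by_cases hz : c.getD (d0-1) 0 = 0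
    · -- digit d0 exhausted: innerB skips it, the flatMap block is empty
      have hguard : ((c.map (fun e : Nat => (e:Int))).getD ((d0:Int) - 1).toNat 0 == 0) = true := by
        rw [htoNat, hgd, hz]
        rfl
      have hstep : innerB ((d0:Int) :: ds.map (fun e : Nat => (e:Int))) (c.map (fun e : Nat => (e:Int))) (k:Int) r
          = innerB (ds.map (fun e : Nat => (e:Int))) (c.map (fun e : Nat => (e:Int))) (k:Int) r := by
        rw [innerB, hguard]
        simp
      have hempty : (if 0 < c.getD (d0-1) 0 then (enumB s (decC c d0)).map (fun l => d0 :: l) else []) = ([] : List (List Nat)) := by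
        rw [hz]
        simp
      rw [List.flatMap_cons, hempty, List.nil_append] at hk
      obtain ⟨d, k', h1, h2, h3, h4, h5, h6⟩ := ih c k r s (fun e he => hds e (by simp [he])) hsum hk
      refine ⟨d, k', h1, h2, h3, h4, ?_, ?_⟩
      · rw [List.map_cons, hstep]
        exact h5
      · rw [List.flatMap_cons, hempty, List.nil_append]
        exact h6
    · -- digit d0 still available
      have hv : 1 ≤ c.getD (d0-1) 0 := by omega
      have hguard : ((c.map (fun e : Nat => (e:Int))).getD ((d0:Int) - 1).toNat 0 == 0) = false := by
        rw [htoNat, hgd, beq_eq_false_iff_ne]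
        exact_mod_cast hz
      have hdecsum : (decC c d0).sum = s := by
        unfold decC
        have := sum_set c (d0-1) (c.getD (d0 - 1) 0 - 1) hidx
        omega
      have hcnt' : (c.map (fun e : Nat => (e:Int))).set ((d0:Int) - 1).toNat
            ((c.map (fun e : Nat => (e:Int))).getD ((d0:Int) - 1).toNat 0 - 1)
          = (decC c d0).map (fun e : Nat => (e:Int)) := by
        rw [htoNat, hgd]
        unfold decC
        rw [List.map_set]
        congr 1
        push_cast [hv]
        omega
      have hmult : multinomialB ((decC c d0).map (fun e : Nat => (e:Int)))
          = ((enumB s (decC c d0)).length : Int) := by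
        rw [multinomialB_eq (decC c d0), hdecsum]
      set N := (enumB s (decC c d0)).length with hN
      have hblocklen : ((enumB s (decC c d0)).map (fun l => d0 :: l)).length = N := by
        rw [List.length_map]
      by_cases hkN : k < N
      · -- unrank lands in this block
        have hstep : innerB ((d0:Int) :: ds.map (fun e : Nat => (e:Int))) (c.map (fun e : Nat => (e:Int))) (k:Int) r
            = ((decC c d0).map (fun e : Nat => (e:Int)), (k:Int), r * 10 + (d0:Int)) := by
          rw [innerB, hguard]
          simp only [Bool.false_eq_true, if_false]
          rw [hcnt', hmult]
          rw [if_pos (by exact_mod_cast hkN)]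
        refine ⟨d0, k, ⟨hd01, hd02⟩, by omega, hdecsum, hkN, by rw [List.map_cons]; exact hstep, ?_⟩
        simp only [List.flatMap_cons, if_pos (by omega : 0 < c.getD (d0-1) 0)]
        rw [List.getD_append _ _ _ _ (by rw [hblocklen]; exact hkN)]
        exact getD_map_of_lt _ _ k [] [] hkN
      · -- skip this block: restore the count and continue with k - N
        have hrestore : ((decC c d0).map (fun e : Nat => (e:Int))).set ((d0:Int) - 1).toNat
              (((decC c d0).map (fun e : Nat => (e:Int))).getD ((d0:Int) - 1).toNat 0 + 1)
            = c.map (fun e : Nat => (e:Int)) := by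
          rw [htoNat]
          have hidx' : d0 - 1 < (decC c d0).length := by simp [decC]; omega
          have hgd2 : (decC c d0).getD (d0-1) 0 = c.getD (d0-1) 0 - 1 := by
            unfold decC
            exact getD_set_self c _ _ hidx
          have hval : ((c.getD (d0-1) 0 - 1 : Nat) : Int) + 1 = ((c.getD (d0-1) 0 : Nat) : Int) := by
            push_cast [hv]
            omega
          rw [getD_map_of_lt _ (decC c d0) (d0-1) 0 0 hidx', hgd2, hval, ← List.map_set]
          unfold decC
          rw [List.set_set, set_getD_self c _ hidx]
      -- note: k ≥ N here
        have hkN' : N ≤ k := by omega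
        have hkcast : (k:Int) - (N:Int) = ((k - N : Nat) : Int) := by push_cast [hkN']; ring
        have hstep : innerB ((d0:Int) :: ds.map (fun e : Nat => (e:Int))) (c.map (fun e : Nat => (e:Int))) (k:Int) r
            = innerB (ds.map (fun e : Nat => (e:Int))) (c.map (fun e : Nat => (e:Int))) ((k - N : Nat) : Int) r := by
          rw [innerB, hguard]
          simp only [Bool.false_eq_true, if_false]
          rw [hcnt', hmult]
          rw [if_neg (by exact_mod_cast hkN)]
          rw [hrestore, hkcast]
        have hk2 : k - N < (ds.flatMap (fun d => if 0 < c.getD (d-1) 0 then (enumB s (decC c d)).map (fun l => d :: l) else [])).length := by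
          simp only [List.flatMap_cons, if_pos (by omega : 0 < c.getD (d0-1) 0), List.length_append, hblocklen] at hk
          omega
        obtain ⟨d, k', h1, h2, h3, h4, h5, h6⟩ := ih c (k - N) r s (fun e he => hds e (by simp [he])) hsum hk2
        refine ⟨d, k', h1, h2, h3, h4, by rw [List.map_cons, hstep]; exact h5, ?_⟩
        simp only [List.flatMap_cons, if_pos (by omega : 0 < c.getD (d0-1) 0)]
        rw [List.getD_append_right _ _ _ _ (by rw [hblocklen]; exact hkN'), hblocklen]
        exact h6

theorem pyRange_cast : ∀ (m : Nat), PySem.List.pyRange 1 ((m:Int)+1) 1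
    = (List.range' 1 m).map (fun e : Nat => (e:Int)) := by
  intro m
  rw [PySem.List.pyRange_one]
  have h1 : ((m:Int) + 1 - 1).toNat = m := by omega
  rw [h1, List.range'_eq_map_range, List.map_map]
  apply List.map_congr_left
  intro k _
  simp only [Function.comp]
  push_cast
  ring

theorem unrank : ∀ (s : Nat) (c : List Nat), c.sum = s → c.length ≤ 9 →
    ∀ (k : Nat), k < (enumB s c).length → ∀ (r : Int),
    outerB s (c.map (fun e : Nat => (e : Int))) (k : Int) r =
      r * 10 ^ s + ((beVal ((enumB s c).getD k [])) : Int) := by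
  intro s
  induction s with
  | zero =>
    intro c hsum _ k hk r
    rw [enumB] at hk ⊢
    simp at hk
    subst hk
    rw [outerB]
    simp [beVal]
  | succ s ih =>
    intro c hsum hlen k hk r
    rw [outerB]
    have hclen : ((c.map (fun e : Nat => (e : Int))).length : Int) = (c.length : Int) := by simp
    rw [hclen, pyRange_cast c.length]
    rw [enumB] at hk
    obtain ⟨d, k', hd, hpos, hdecsum, hk', hinner, hgetD⟩ :=
      inner_lemma (List.range' 1 c.length) c k r s
        (fun e he => by
          obtain ⟨h1, h2⟩ := List.mem_range'_1.mp he
          exact ⟨h1, by omega⟩) hsum hk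
    rw [hinner]
    have hdeclen : (decC c d).length ≤ 9 := by simp [decC]; omega
    rw [ih (decC c d) hdecsum hdeclen k' hk' (r * 10 + (d:Int))]
    have hgetD' : (enumB (s+1) c).getD k [] = d :: ((enumB s (decC c d)).getD k' []) := by
      rw [enumB]
      exact hgetD
    rw [hgetD']
    have ht : (enumB s (decC c d)).getD k' [] ∈ enumB s (decC c d) := by
      rw [List.getD_eq_getElem?_getD, List.getElem?_eq_getElem hk']
      exact Option.getD_some ▸ (by simpa using List.getElem_mem _)
    have hlent : ((enumB s (decC c d)).getD k' []).length = s :=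
      length_mem_enumB s (decC c d) _ ht
    rw [beVal_cons, hlent]
    push_cast
    ring

theorem pick_lemma : ∀ (ms : List Nat) (k : Nat),
    (∀ m ∈ ms, 1 ≤ m ∧ m ≤ 9) → k < (ms.flatMap blockInt).length →
    ∃ (m : Nat) (k' : Nat), (1 ≤ m ∧ m ≤ 9) ∧ k' < (enumB (canonCnt m).sum (canonCnt m)).length ∧
      pickBlockB (ms.map (fun e : Nat => (e:Int))) (k : Int)
        = ((canonCnt m).map (fun e : Nat => (e:Int)), (k' : Int)) ∧
      (ms.flatMap blockInt).getD k 0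
        = ((beVal ((enumB (canonCnt m).sum (canonCnt m)).getD k' []) : Nat) : Int) := by
  intro ms
  induction ms with
  | nil => intro k _ hk; simp at hk
  | cons m0 ms ih =>
    intro k hms hk
    obtain ⟨hm01, hm02⟩ := hms m0 (by simp)
    set N := (enumB (canonCnt m0).sum (canonCnt m0)).length with hN
    have hblen : (blockInt m0).length = N := by
      rw [hN]
      unfold blockInt
      simp
    have hcnt : PySem.List.pyRange 1 ((m0:Int) + 1) 1 = (canonCnt m0).map (fun e : Nat => (e:Int)) := by
      rw [pyRange_cast m0]
      rfl
    have htotal : multinomialB (PySem.List.pyRange 1 ((m0:Int) + 1) 1) = (N : Int) := by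
      rw [hcnt, multinomialB_eq]
    by_cases hkN : k < N
    · refine ⟨m0, k, ⟨hm01, hm02⟩, hkN, ?_, ?_⟩
      · rw [List.map_cons, pickBlockB, htotal, if_pos (by exact_mod_cast hkN), hcnt]
      · simp only [List.flatMap_cons]
        rw [List.getD_append _ _ _ _ (by rw [hblen]; exact hkN)]
        unfold blockInt
        rw [List.map_map]
        exact getD_map_of_lt _ _ k [] 0 hkN
    · have hkN' : N ≤ k := by omega
      have hkcast : (k:Int) - (N:Int) = ((k - N : Nat) : Int) := by push_cast [hkN']; ring
      have hk2 : k - N < (ms.flatMap blockInt).length := by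
        simp only [List.flatMap_cons, List.length_append, hblen] at hk
        omega
      obtain ⟨m, k', h1, h2, h3, h4⟩ := ih (k - N) (fun e he => hms e (by simp [he])) hk2
      refine ⟨m, k', h1, h2, ?_, ?_⟩
      · rw [List.map_cons, pickBlockB, htotal, if_neg (by exact_mod_cast hkN), hkcast]
        exact h3
      · simp only [List.flatMap_cons]
        rw [List.getD_append_right _ _ _ _ (by rw [hblen]; exact hkN'), hblen]
        exact h4

theorem B_eval (n : Int) (h1 : 1 ≤ n) (h2 : n ≤ 2147483648) :
    nth_magic_number_alt n = bigL.getD (n - 1).toNat 0 := by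
  rw [nth_magic_number_alt, if_neg (by omega)]
  have hkN : (n - 1) = (((n-1).toNat : Nat) : Int) := by omega
  set k := (n - 1).toNat with hk
  have hklt : k < bigL.length := by
    have := bigL_length_ge
    omega
  have hrange9 : PySem.List.pyRange 1 10 1 = (List.range' 1 9).map (fun e : Nat => (e:Int)) := by
    have := pyRange_cast 9
    norm_num at this
    exact this
  obtain ⟨m, k', ⟨hm1, hm9⟩, hk', hpick, hgetD⟩ :=
    pick_lemma (List.range' 1 9) k
      (fun e he => by
        obtain ⟨a, b⟩ := List.mem_range'_1.mp he
        exact ⟨a, by omega⟩)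
      (by exact hklt)
  show (let bk := pickBlockB (PySem.List.pyRange 1 10 1) (n - 1)
    outerB (bk.1.foldl (· + ·) 0).toNat bk.1 bk.2 0) = bigL.getD k 0
  rw [hrange9, hkN, hpick]
  show outerB (((canonCnt m).map (fun e : Nat => (e:Int))).foldl (· + ·) 0).toNat
      ((canonCnt m).map (fun e : Nat => (e:Int))) (k' : Int) 0 = bigL.getD k 0
  have hsumfold : (((canonCnt m).map (fun e : Nat => (e:Int))).foldl (· + ·) 0).toNat
      = (canonCnt m).sum := by
    rw [foldl_add_cast, zero_add, Int.toNat_natCast]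
  rw [hsumfold]
  rw [unrank (canonCnt m).sum (canonCnt m) rfl (by rw [canonCnt_length]; omega) k' hk' 0]
  rw [zero_mul, zero_add]
  exact hgetD.symm

-- ===== VERDICT (by name: the statement is the Claim_ definition above) =====
theorem nth_magic_number_spec : Claim_equal_nth_magic_number := by
  intro n hdom hpre
  unfold Dom_nth_magic_number pvDomInt at hdom
  have h2 : n ≤ 2147483648 := by simpa using (of_decide_eq_true hdom).2
  unfold Spec_nth_magic_number
  rw [A_eval n hpre h2, B_eval n hpre h2]
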